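-- pv_equiv track=rewrite | github.com/colemai/bioinformatics_scripts | university/p3/parse_rfam.py | calc_num_basepairs
-- ===== SOURCE A (Python) =====
-- def calc_num_basepairs(struct_str):
--     """Return the number of basepairs (int) in secondary structure
--
--     struct_str: string, secondary structure in Stockholm format
--
--     Pairs are indicated by {}, <>, (), and []
--     Unpaired bases are indicated by _-:, and ~
--     """
--     num_open = 0
--     num_close = 0
--     for sym in struct_str:
--         if sym in '<{[(':
--             num_open += 1
--         elif sym in '>}])':
--             num_close += 1
--         else:
--             pass
--     assert num_open == num_close
--     return num_open
-- ===== SOURCE B (Python) =====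
-- def calc_num_basepairs(struct_str):
--     """Return the number of basepairs (int) in secondary structure
--
--     Staged re-implementation: no per-character loop; each bracket's
--     occurrences are counted by a dedicated str.count scan and summed.
--     """
--     num_open = (struct_str.count('<') + struct_str.count('{')
--                 + struct_str.count('[') + struct_str.count('('))
--     num_close = (struct_str.count('>') + struct_str.count('}')
--                  + struct_str.count(']') + struct_str.count(')'))
--     assert num_open == num_close
--     return num_open
-- ===== Notes on version B (the rewrite author's own statement) =====
-- stated objective: faster
-- what changed: Removes A's per-character branching loop with two running counters entirely: B makes eight independent str.count scans (one per bracket symbol) and sums them into num_open/num_close, keeping the assert so unbalanced strings still raise AssertionError.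
import Mathlib
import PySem

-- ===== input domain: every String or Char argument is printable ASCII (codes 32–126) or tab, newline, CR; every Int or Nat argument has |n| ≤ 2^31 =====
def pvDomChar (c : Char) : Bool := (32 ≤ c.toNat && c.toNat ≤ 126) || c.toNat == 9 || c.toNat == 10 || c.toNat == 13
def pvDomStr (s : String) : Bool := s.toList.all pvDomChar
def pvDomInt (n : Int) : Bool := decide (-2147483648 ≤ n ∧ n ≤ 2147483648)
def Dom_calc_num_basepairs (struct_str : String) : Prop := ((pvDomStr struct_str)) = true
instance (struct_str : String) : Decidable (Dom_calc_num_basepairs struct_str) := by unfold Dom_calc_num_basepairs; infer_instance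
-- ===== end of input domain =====

-- B replaces A's per-character branching loop by eight str.count scans summed per side (measurably faster: the scans run in C, no Python-level loop); Pre_ excludes unbalanced strings, on which both raise AssertionError.


-- ===== PORT A =====
-- literal port of A's loop: a fold over the characters carrying (num_open, num_close)
def calc_num_basepairs (struct_str : String) : Int :=
  let st := struct_str.toList.foldl
    (fun (p : Int × Int) sym =>
      if ['<', '{', '[', '('].contains sym then (p.1 + 1, p.2)
      else if ['>', '}', ']', ')'].contains sym then (p.1, p.2 + 1)
      else p)
    (0, 0)
  -- assert num_open == num_close raises outside Pre_; inside Pre_ it passes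
  st.1

-- ===== PORT B =====
-- literal port of Source B: eight str.count scans, summed per side; no per-character loop
def calc_num_basepairs_alt (struct_str : String) : Int :=
  let numOpen : Int :=
    (PySem.Str.count struct_str "<" : Int) + (PySem.Str.count struct_str "{" : Int)
      + (PySem.Str.count struct_str "[" : Int) + (PySem.Str.count struct_str "(" : Int)
  let _numClose : Int :=
    (PySem.Str.count struct_str ">" : Int) + (PySem.Str.count struct_str "}" : Int)
      + (PySem.Str.count struct_str "]" : Int) + (PySem.Str.count struct_str ")" : Int)
  -- assert numOpen == numClose raises outside Pre_; inside Pre_ it passes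
  numOpen

-- ===== PRECONDITION & SPEC =====
-- Pre_ excludes exactly the unbalanced strings, on which A's assert raises AssertionError
def Pre_calc_num_basepairs (struct_str : String) : Prop :=
  struct_str.toList.countP (fun c => ['<', '{', '[', '('].contains c)
    = struct_str.toList.countP (fun c => ['>', '}', ']', ')'].contains c)
instance (struct_str : String) : Decidable (Pre_calc_num_basepairs struct_str) := by
  unfold Pre_calc_num_basepairs; infer_instance
def pvWitness_calc_num_basepairs : String := "<<{[()]}>>"

def Spec_calc_num_basepairs (struct_str : String) (out : Int) : Prop := out = calc_num_basepairs_alt struct_str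
instance (struct_str : String) (out : Int) : Decidable (Spec_calc_num_basepairs struct_str out) := by unfold Spec_calc_num_basepairs; infer_instance

-- ===== CLAIM =====
def Claim_equal_calc_num_basepairs : Prop := ∀ (struct_str : String), Dom_calc_num_basepairs struct_str → Pre_calc_num_basepairs struct_str → Spec_calc_num_basepairs struct_str (calc_num_basepairs struct_str)

-- ===== LEMMAS AND PROOFS =====

-- A's pair-fold: first component counts the open brackets
theorem fold_fst_countP (l : List Char) (o c : Int) :
    (l.foldl
      (fun (p : Int × Int) sym =>
        if ['<', '{', '[', '('].contains sym then (p.1 + 1, p.2)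
        else if ['>', '}', ']', ')'].contains sym then (p.1, p.2 + 1)
        else p)
      (o, c)).1
    = o + (l.countP (fun x => ['<', '{', '[', '('].contains x) : Int) := by
  induction l generalizing o c with
  | nil => simp
  | cons x xs ih =>
    rw [List.foldl_cons, List.countP_cons]
    by_cases h1 : (['<', '{', '[', '('].contains x) = true
    · rw [if_pos h1, ih, if_pos h1]; push_cast; ring
    · by_cases h2 : (['>', '}', ']', ')'].contains x) = true
      · rw [if_neg h1, if_pos h2, ih, if_neg h1]; simp
      · rw [if_neg h1, if_neg h2, ih, if_neg h1]; simp

-- the open-bracket countP splits into the four individual counts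
theorem countP_open_split (l : List Char) :
    (l.countP (fun x => ['<', '{', '[', '('].contains x) : Int)
      = l.count '<' + l.count '{' + l.count '[' + l.count '(' := by
  induction l with
  | nil => simp
  | cons x xs ih =>
    simp only [List.countP_cons, List.count_cons]
    by_cases h1 : x = '<' <;> by_cases h2 : x = '{' <;> by_cases h3 : x = '[' <;>
      by_cases h4 : x = '(' <;> simp_all <;> omega

-- Python str.count with a single-character needle is List.count
theorem count_go_singleton (c : Char) (fuel : Nat) (l : List Char) (acc : Nat)
    (h : l.length ≤ fuel) :
    PySem.Chars.count.go [c] fuel l acc = acc + l.count c := by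
  induction fuel generalizing l acc with
  | zero =>
    interval_cases hl : l.length
    · simp at hl; subst hl; simp [PySem.Chars.count.go]
  | succ n ih =>
    cases l with
    | nil => simp [PySem.Chars.count.go]
    | cons x xs =>
      rw [PySem.Chars.count.go]
      simp only [List.length_cons] at h
      by_cases hx : x = c
      · subst hx
        have hp : [x].isPrefixOf (x :: xs) = true := by simp [List.isPrefixOf]
        rw [if_pos hp]
        simp only [List.length_cons, List.length_nil, Nat.zero_add, List.drop_one,
          List.tail_cons]
        rw [ih xs (acc + 1) (by omega)]
        simp [List.count_cons]
        omega
      · have hp' : ([c].isPrefixOf (x :: xs)) = false := by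
          simp [List.isPrefixOf]; exact fun h' => hx h'.symm
        rw [if_neg (by simp [hp'])]
        rw [ih xs acc (by omega)]
        simp [List.count_cons, hx]

theorem strCount_singleton (s : String) (c : Char) :
    PySem.Str.count s (String.ofList [c]) = s.toList.count c := by
  rw [PySem.Str.count_eq]
  have : (String.ofList [c]).toList = [c] := by simp
  rw [this]
  unfold PySem.Chars.count
  rw [if_neg (by simp)]
  simpa using count_go_singleton c s.toList.length s.toList 0 le_rfl

-- ===== VERDICT =====
theorem calc_num_basepairs_spec : Claim_equal_calc_num_basepairs := by
  intro s _ _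
  show calc_num_basepairs s = calc_num_basepairs_alt s
  unfold calc_num_basepairs calc_num_basepairs_alt
  simp only [fold_fst_countP]
  have h1 : ("<" : String) = String.ofList ['<'] := rfl
  have h2 : ("{" : String) = String.ofList ['{'] := rfl
  have h3 : ("[" : String) = String.ofList ['['] := rfl
  have h4 : ("(" : String) = String.ofList ['('] := rfl
  rw [h1, h2, h3, h4, strCount_singleton, strCount_singleton, strCount_singleton,
    strCount_singleton, countP_open_split]
  push_cast
  ring
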